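-- pv_equiv track=rewrite | github.com/ABI-Software/mbfxml2ex | src/mbfxml2ex/utilities.py | get_elements_for_path_old
-- ===== SOURCE A (Python) =====
-- def get_elements_for_path_old(node_map, element_to_node_map, target_path):
--     """
--     Given a node_map and element_to_node_map, return all elements associated with
--     nodes that share the same parent path as the given target_path.
--
--     Parameters:
--     - node_map: dict mapping node_id -> path (list of indices)
--     - element_to_node_map: dict mapping element_id -> list of node_ids
--     - target_path: list representing the path to a node in the embedded structure
--
--     Returns:
--     - List of element_ids that are connected to nodes from the same embedded list
--     """
--     parent_path = tuple(target_path[:-1])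
--
--     # Find all node_ids that share the same parent path
--     relevant_nodes = [
--         node_id for node_id, path in node_map.items()
--         if tuple(path[:-1]) == parent_path
--     ]
--
--     # Find all elements that use any of these nodes
--     elements = set()
--     for element_id, node_ids in element_to_node_map.items():
--         if any(node in relevant_nodes for node in node_ids):
--             elements.add(element_id)
--
--     return list(elements)
-- ===== SOURCE B (Python) =====
-- def get_elements_for_path_old(node_map, element_to_node_map, target_path):
--     """Fused single pass: check each element's nodes directly against the
--     parent path via node_map.get, no intermediate relevant_nodes list."""
--     parent_path = tuple(target_path[:-1])
--     elements = set()
--     for element_id, node_ids in element_to_node_map.items():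
--         for node in node_ids:
--             path = node_map.get(node)
--             if path is not None and tuple(path[:-1]) == parent_path:
--                 elements.add(element_id)
--                 break
--     return list(elements)
-- ===== Notes on version B (the rewrite author's own statement) =====
-- stated objective: simpler
-- what changed: Instead of first building a relevant_nodes list and then testing each element's nodes for membership in it, B makes one fused pass over the elements, checking each node's own path directly via node_map.get and breaking at the first hit; no intermediate index is built.
import Mathlib
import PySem

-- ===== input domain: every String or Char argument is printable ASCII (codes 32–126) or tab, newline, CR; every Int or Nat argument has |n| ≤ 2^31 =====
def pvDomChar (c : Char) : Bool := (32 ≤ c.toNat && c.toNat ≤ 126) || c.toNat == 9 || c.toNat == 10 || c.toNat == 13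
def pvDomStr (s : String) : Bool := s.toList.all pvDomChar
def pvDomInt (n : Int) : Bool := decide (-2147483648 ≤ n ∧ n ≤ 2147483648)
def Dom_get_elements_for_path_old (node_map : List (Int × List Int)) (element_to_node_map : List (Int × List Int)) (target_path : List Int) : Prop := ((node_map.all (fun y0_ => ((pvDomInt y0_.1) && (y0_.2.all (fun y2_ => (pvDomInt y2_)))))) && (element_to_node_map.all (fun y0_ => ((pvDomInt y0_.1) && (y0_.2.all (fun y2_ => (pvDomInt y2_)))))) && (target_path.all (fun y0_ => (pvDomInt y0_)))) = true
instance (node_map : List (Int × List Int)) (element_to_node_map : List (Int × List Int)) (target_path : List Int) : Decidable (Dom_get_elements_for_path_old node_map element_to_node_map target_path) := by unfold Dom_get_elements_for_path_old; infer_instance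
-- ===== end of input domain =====

-- ===== PORT A =====
-- B replaces A's two-phase relevant_nodes-list-then-membership-scan with one fused pass that checks each node via node_map.get.
-- Python 'target_path[:-1]' / 'path[:-1]' is List.dropLast (empty list slices to empty).
def get_elements_for_path_old (node_map : List (Int × List Int)) (element_to_node_map : List (Int × List Int)) (target_path : List Int) : List Int :=
  let parent_path := target_path.dropLast
  let relevant_nodes := (node_map.filter (fun p => p.2.dropLast == parent_path)).map Prod.fst
  let elements : PySem.Set Int :=
    element_to_node_map.foldl
      (fun s p => if p.2.any (fun node => relevant_nodes.contains node) then PySem.Set.add s p.1 else s)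
      PySem.Set.empty
  elements

-- ===== PORT B =====
-- 'path = node_map.get(node); if path is not None and tuple(path[:-1]) == parent_path'
def altNodeMatches (node_map : List (Int × List Int)) (parent_path : List Int) (node : Int) : Bool :=
  match (PySem.Dict.mk node_map).get? node with
  | some path => path.dropLast == parent_path
  | none => false

-- inner 'for node in node_ids: … break' = first matching node, i.e. List.any
def get_elements_for_path_old_alt (node_map : List (Int × List Int)) (element_to_node_map : List (Int × List Int)) (target_path : List Int) : List Int :=
  let parent_path := target_path.dropLast
  element_to_node_map.foldl
    (fun s p => if p.2.any (altNodeMatches node_map parent_path) then PySem.Set.add s p.1 else s)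
    PySem.Set.empty

-- ===== PRECONDITION & SPEC =====
-- Pre_ only requires node_map's keys to be distinct, which every Python dict guarantees;
-- the assoc-list encoding admits duplicate keys no Python call can pass, and there A's
-- items-scan and B's first-match get() would read different entries.
def Pre_get_elements_for_path_old (node_map : List (Int × List Int)) (element_to_node_map : List (Int × List Int)) (target_path : List Int) : Prop :=
  (node_map.map Prod.fst).Nodup
instance (node_map : List (Int × List Int)) (element_to_node_map : List (Int × List Int)) (target_path : List Int) : Decidable (Pre_get_elements_for_path_old node_map element_to_node_map target_path) := by unfold Pre_get_elements_for_path_old; infer_instance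

def pvWitness_get_elements_for_path_old : (List (Int × List Int)) × (List (Int × List Int)) × List Int :=
  ([(1, [0, 2]), (2, [0, 3]), (3, [1, 0])], [(10, [1, 3]), (11, [3]), (12, [2, 9])], [0, 5])

def Spec_get_elements_for_path_old (node_map : List (Int × List Int)) (element_to_node_map : List (Int × List Int)) (target_path : List Int) (out : List Int) : Prop := out = get_elements_for_path_old_alt node_map element_to_node_map target_path
instance (node_map : List (Int × List Int)) (element_to_node_map : List (Int × List Int)) (target_path : List Int) (out : List Int) : Decidable (Spec_get_elements_for_path_old node_map element_to_node_map target_path out) := by unfold Spec_get_elements_for_path_old; infer_instance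

-- ===== CLAIM (what is proved, stated in full; the proofs are below) =====
def Claim_equal_get_elements_for_path_old : Prop := ∀ (node_map : List (Int × List Int)) (element_to_node_map : List (Int × List Int)) (target_path : List Int), Dom_get_elements_for_path_old node_map element_to_node_map target_path → Pre_get_elements_for_path_old node_map element_to_node_map target_path → Spec_get_elements_for_path_old node_map element_to_node_map target_path (get_elements_for_path_old node_map element_to_node_map target_path)

-- ===== LEMMAS AND PROOFS =====

-- with distinct keys, membership in A's relevant_nodes list coincides with B's per-node lookup check
theorem contains_relevant_eq_altNodeMatches (node_map : List (Int × List Int)) (parent_path : List Int)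
    (h : (node_map.map Prod.fst).Nodup) (node : Int) :
    ((node_map.filter (fun p => p.2.dropLast == parent_path)).map Prod.fst).contains node
      = altNodeMatches node_map parent_path node := by
  induction node_map with
  | nil => simp [altNodeMatches, PySem.Dict.get?]
  | cons hd tl ih =>
    obtain ⟨k, v⟩ := hd
    simp only [List.map_cons, List.nodup_cons] at h
    obtain ⟨hk, htl⟩ := h
    have hget := PySem.Dict.get?_mk_cons (rest := tl) k v node
    by_cases hnk : node = k
    · subst hnk
      simp only [altNodeMatches, hget, BEq.rfl, if_pos]
      by_cases hm : (v.dropLast == parent_path) = true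
      · simp [hm]
      · simp only [Bool.not_eq_true] at hm
        simp only [List.filter_cons, hm, Bool.false_eq_true, if_neg, not_false_iff]
        -- node = k is not among tl's keys, so not in the filtered sublist either
        simp only [List.contains_eq_mem, decide_eq_false_iff_not]
        intro hmem
        exact hk (by
          rcases List.mem_map.mp hmem with ⟨p, hp, hp1⟩
          exact List.mem_map.mpr ⟨p, List.mem_of_mem_filter hp, hp1⟩)
    · have hbeq : (k == node) = false := by simpa using fun h => hnk h.symm
      simp only [altNodeMatches, hget, hbeq, Bool.false_eq_true, if_neg, not_false_iff]
      rw [← altNodeMatches, ← ih htl]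
      by_cases hm : (v.dropLast == parent_path) = true
      · simp [hm, List.contains_eq_mem, hnk]
      · simp only [Bool.not_eq_true] at hm
        simp [hm]

-- ===== VERDICT (by name: the statement is the Claim_ definition above) =====
theorem get_elements_for_path_old_spec : Claim_equal_get_elements_for_path_old := by
  intro node_map element_to_node_map target_path _ hpre
  unfold Spec_get_elements_for_path_old get_elements_for_path_old get_elements_for_path_old_alt
  simp only
  congr 1
  funext s p
  congr 1
  have hf : (fun node => ((node_map.filter (fun p => p.2.dropLast == target_path.dropLast)).map Prod.fst).contains node) = altNodeMatches node_map target_path.dropLast :=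
    funext (contains_relevant_eq_altNodeMatches node_map target_path.dropLast hpre)
  rw [hf]
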